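-- pv_equiv track=rewrite | github.com/hungnts1008/KTPM-14 | logic.py | get_canon_moves
-- ===== SOURCE A (Python) =====
-- def get_canon_moves(board, row, col):
--     # chinese chess canon movement logic
--     piece = board[row][col]
--     moves = []
--     directions = [(1, 0), (-1, 0), (0, 1), (0, -1)]
--     jumped = False
--
--     for dr, dc in directions:
--         jumped = False
--         r, c = row + dr, col + dc
--         while 0 <= r < len(board) and 0 <= c < len(board[r]):
--             if board[r][c] == ".":
--                 if not jumped:
--                     moves.append((r, c))
--                 else:
--                     r += dr
--                     c += dc
--                     continue
--             elif board[r][c].isupper() != piece.isupper():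
--                 if jumped == True:
--                     moves.append((r, c))
--                     break
--                 else:
--                     jumped = True
--             else:
--                 break
--             r += dr
--             c += dc
--     return moves
-- ===== SOURCE B (Python) =====
-- def get_canon_moves(board, row, col):
--     # cannon moves via materialized rays: build the in-bounds ray of cells per
--     # direction, then pure list processing (prefix of empties = slides; among
--     # the remaining non-empty cells, screen + target must both be enemies)
--     pu = board[row][col].isupper()
--     moves = []
--     for dr, dc in ((1, 0), (-1, 0), (0, 1), (0, -1)):
--         ray = []
--         r, c = row + dr, col + dc
--         while 0 <= r < len(board) and 0 <= c < len(board[r]):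
--             ray.append(((r, c), board[r][c]))
--             r += dr
--             c += dc
--         k = next((i for i, (_, p) in enumerate(ray) if p != "."), len(ray))
--         moves.extend(sq for sq, _ in ray[:k])
--         rest = [(sq, p) for sq, p in ray[k:] if p != "."]
--         if len(rest) >= 2 and rest[0][1].isupper() != pu and rest[1][1].isupper() != pu:
--             moves.append(rest[1][0])
--     return moves
-- ===== Notes on version B (the rewrite author's own statement) =====
-- stated objective: alternative
-- what changed: Instead of A's single flag-driven stepping loop, B materializes each direction's in-bounds ray as a list of (square, piece) pairs and derives the moves by pure list processing: slides are the empty prefix up to the first blocker index, and a capture exists iff the first two non-empty cells of the remainder are both enemies.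
import Mathlib
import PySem

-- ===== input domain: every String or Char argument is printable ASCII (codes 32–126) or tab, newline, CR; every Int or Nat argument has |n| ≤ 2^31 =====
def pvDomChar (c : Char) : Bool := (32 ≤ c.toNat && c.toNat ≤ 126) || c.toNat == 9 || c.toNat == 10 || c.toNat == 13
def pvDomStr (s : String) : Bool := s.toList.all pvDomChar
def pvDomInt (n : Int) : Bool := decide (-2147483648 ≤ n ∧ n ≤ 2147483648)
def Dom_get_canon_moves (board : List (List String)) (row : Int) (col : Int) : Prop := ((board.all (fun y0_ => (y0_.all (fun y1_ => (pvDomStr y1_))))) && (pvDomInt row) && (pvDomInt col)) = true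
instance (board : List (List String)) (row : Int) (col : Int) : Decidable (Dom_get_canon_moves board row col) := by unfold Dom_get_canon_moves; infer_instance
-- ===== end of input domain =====

-- B drops A's stepping flag loop: per direction it first materializes the
-- in-bounds ray of cells as a list, then computes moves by pure list
-- processing (empty prefix = slides; among the remaining non-empty cells the
-- first two must both be enemies for a capture); objective: alternative
-- decomposition, same cost.

-- shared primitive ports (both Pythons evaluate exactly these expressions)
-- str.isupper(): at least one cased character and no lowercase one
-- (exact on the printable-ASCII domain, where cased = A-Z/a-z)
def pvIsupper (s : String) : Bool :=
  s.toList.any PySem.Chars.isalpha && s.toList.all (fun c => ! PySem.Chars.islower c)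

-- board[r] for 0 ≤ r < len(board) (getD never fires inside the loops' bounds)
def pvRowAt (board : List (List String)) (r : Int) : List String :=
  (PySem.List.pyGet? board r).getD []

-- board[r][c] for in-bounds r, c
def pvCellAt (board : List (List String)) (r c : Int) : String :=
  (PySem.List.pyGet? (pvRowAt board r) c).getD ""

-- fuel: strictly more than the number of loop steps any single ray can take
def pvFuel (board : List (List String)) : Nat :=
  board.length + (board.map List.length).sum + 1

-- ===== PORT A =====
-- A's while loop for one direction, with the `jumped` flag as loop state
def pvRayA (board : List (List String)) (pu : Bool) (dr dc : Int) :
    Nat → Int → Int → Bool → List (Int × Int)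
  | 0, _, _, _ => []
  | fuel + 1, r, c, jumped =>
    if 0 ≤ r ∧ r < (board.length : Int) ∧ 0 ≤ c ∧ c < ((pvRowAt board r).length : Int) then
      if pvCellAt board r c == "." then
        if !jumped then (r, c) :: pvRayA board pu dr dc fuel (r + dr) (c + dc) jumped
        else pvRayA board pu dr dc fuel (r + dr) (c + dc) jumped
      else if pvIsupper (pvCellAt board r c) != pu then
        if jumped then [(r, c)]
        else pvRayA board pu dr dc fuel (r + dr) (c + dc) true
      else []
    else []

def get_canon_moves (board : List (List String)) (row : Int) (col : Int) : List (Int × Int) :=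
  let piece := pvCellAt board row col
  [((1 : Int), (0 : Int)), (-1, 0), (0, 1), (0, -1)].foldl
    (fun moves d =>
      moves ++ pvRayA board (pvIsupper piece) d.1 d.2 (pvFuel board) (row + d.1) (col + d.2) false)
    []

-- ===== PORT B =====
-- Source B's inner while loop: the in-bounds ray of (square, piece) pairs
def pvRayCells (board : List (List String)) (dr dc : Int) :
    Nat → Int → Int → List ((Int × Int) × String)
  | 0, _, _ => []
  | fuel + 1, r, c =>
    if 0 ≤ r ∧ r < (board.length : Int) ∧ 0 ≤ c ∧ c < ((pvRowAt board r).length : Int) then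
      ((r, c), pvCellAt board r c) :: pvRayCells board dr dc fuel (r + dr) (c + dc)
    else []

-- Source B's list processing of one ray: k = first blocker index (next(…)/enumerate
-- = findIdx, defaulting to the length), slides = ray[:k], rest = non-empty
-- cells of ray[k:], capture iff rest's first two cells are both enemies
def pvProcessRay (pu : Bool) (ray : List ((Int × Int) × String)) : List (Int × Int) :=
  let k := ray.findIdx (fun x => x.2 != ".")
  let rest := (ray.drop k).filter (fun x => x.2 != ".")
  (ray.take k).map (fun x => x.1) ++
    (match rest with
     | s :: t :: _ => if (pvIsupper s.2 != pu) && (pvIsupper t.2 != pu) then [t.1] else []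
     | _ => [])

def get_canon_moves_alt (board : List (List String)) (row : Int) (col : Int) : List (Int × Int) :=
  let pu := pvIsupper (pvCellAt board row col)
  [((1 : Int), (0 : Int)), (-1, 0), (0, 1), (0, -1)].flatMap
    (fun d => pvProcessRay pu (pvRayCells board d.1 d.2 (pvFuel board) (row + d.1) (col + d.2)))

-- ===== PRECONDITION & SPEC =====
-- Pre_ excludes exactly the inputs where `board[row][col]` raises IndexError
def Pre_get_canon_moves (board : List (List String)) (row : Int) (col : Int) : Prop :=
  (-(board.length : Int) ≤ row ∧ row < (board.length : Int)) ∧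
  (-((pvRowAt board row).length : Int) ≤ col ∧ col < ((pvRowAt board row).length : Int))
instance (board : List (List String)) (row : Int) (col : Int) : Decidable (Pre_get_canon_moves board row col) := by unfold Pre_get_canon_moves; infer_instance

def pvWitness_get_canon_moves : List (List String) × Int × Int :=
  ([[".", "c", "."], [".", "P", "."], [".", "r", "."]], 0, 1)

def Spec_get_canon_moves (board : List (List String)) (row : Int) (col : Int) (out : List (Int × Int)) : Prop := out = get_canon_moves_alt board row col
instance (board : List (List String)) (row : Int) (col : Int) (out : List (Int × Int)) : Decidable (Spec_get_canon_moves board row col out) := by unfold Spec_get_canon_moves; infer_instance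

-- ===== CLAIM (what is proved, stated in full; the proofs are below) =====
def Claim_equal_get_canon_moves : Prop := ∀ (board : List (List String)) (row : Int) (col : Int), Dom_get_canon_moves board row col → Pre_get_canon_moves board row col → Spec_get_canon_moves board row col (get_canon_moves board row col)

-- ===== LEMMAS AND PROOFS =====

-- the capture B extracts from the non-empty tail of a ray past the screen
def pvCapOf (pu : Bool) : List ((Int × Int) × String) → List (Int × Int)
  | t :: _ => if pvIsupper t.2 != pu then [t.1] else []
  | [] => []

-- processing a ray that starts with an empty square: slide, recurse
theorem processRay_cons_dot (pu : Bool) (x : (Int × Int) × String)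
    (l : List ((Int × Int) × String)) (h : x.2 = ".") :
    pvProcessRay pu (x :: l) = x.1 :: pvProcessRay pu l := by
  have hp : (x.2 != ".") = false := by simp [h]
  simp [pvProcessRay, List.findIdx_cons, hp]

-- processing a ray that starts with a blocker: capture iff screen and target are enemies
theorem processRay_cons_block (pu : Bool) (x : (Int × Int) × String)
    (l : List ((Int × Int) × String)) (h : ¬ x.2 = ".") :
    pvProcessRay pu (x :: l) =
      if pvIsupper x.2 != pu then pvCapOf pu (l.filter (fun y => y.2 != ".")) else [] := by
  have hp : (x.2 != ".") = true := by simp [h]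
  simp only [pvProcessRay, List.findIdx_cons, hp, cond_true, List.take_zero, List.map_nil,
    List.drop_zero, List.nil_append, List.filter_cons]
  cases hf : l.filter (fun y => y.2 != ".") with
  | nil =>
    cases h1 : (pvIsupper x.2 != pu) <;> simp [pvCapOf]
  | cons t ts =>
    cases h1 : (pvIsupper x.2 != pu) <;> cases h2 : (pvIsupper t.2 != pu) <;>
      simp [pvCapOf, h1, h2]

-- one unfolding of Source B's ray-building loop
theorem rayCells_succ (board : List (List String)) (dr dc : Int) (n : Nat) (r c : Int)
    (hb : 0 ≤ r ∧ r < (board.length : Int) ∧ 0 ≤ c ∧ c < ((pvRowAt board r).length : Int)) :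
    pvRayCells board dr dc (n + 1) r c =
      ((r, c), pvCellAt board r c) :: pvRayCells board dr dc n (r + dr) (c + dc) := by
  simp [pvRayCells, hb]

-- A's loop with the flag set = B's capture extracted from the filtered ray tail
theorem rayA_true_eq_cap (board : List (List String)) (pu : Bool) (dr dc : Int) :
    ∀ (fuel : Nat) (r c : Int),
      pvRayA board pu dr dc fuel r c true =
        pvCapOf pu ((pvRayCells board dr dc fuel r c).filter (fun y => y.2 != ".")) := by
  intro fuel
  induction fuel with
  | zero => intro r c; rfl
  | succ n ih =>
    intro r c
    by_cases hb : 0 ≤ r ∧ r < (board.length : Int) ∧ 0 ≤ c ∧ c < ((pvRowAt board r).length : Int)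
    · rw [rayCells_succ board dr dc n r c hb]
      by_cases hdot : pvCellAt board r c = "."
      · simp [pvRayA, hb, hdot, ih]
      · by_cases hen : pvIsupper (pvCellAt board r c) = pu <;>
          simp [pvRayA, hb, hdot, hen, pvCapOf]
    · simp [pvRayA, pvRayCells, hb, pvCapOf]

-- A's loop with the flag unset = B's ray processing
theorem rayA_false_eq_process (board : List (List String)) (pu : Bool) (dr dc : Int) :
    ∀ (fuel : Nat) (r c : Int),
      pvRayA board pu dr dc fuel r c false =
        pvProcessRay pu (pvRayCells board dr dc fuel r c) := by
  intro fuel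
  induction fuel with
  | zero => intro r c; rfl
  | succ n ih =>
    intro r c
    by_cases hb : 0 ≤ r ∧ r < (board.length : Int) ∧ 0 ≤ c ∧ c < ((pvRowAt board r).length : Int)
    · rw [rayCells_succ board dr dc n r c hb]
      by_cases hdot : pvCellAt board r c = "."
      · rw [processRay_cons_dot pu _ _ hdot]
        simp [pvRayA, hb, hdot, ih]
      · rw [processRay_cons_block pu _ _ hdot]
        by_cases hen : pvIsupper (pvCellAt board r c) = pu <;>
          simp [pvRayA, hb, hdot, hen, rayA_true_eq_cap]
    · simp [pvRayA, pvRayCells, hb, pvProcessRay]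

-- ===== VERDICT (by name: the statement is the Claim_ definition above) =====
theorem get_canon_moves_spec : Claim_equal_get_canon_moves := by
  intro board row col _ _
  unfold Spec_get_canon_moves get_canon_moves get_canon_moves_alt
  simp [List.foldl, List.flatMap, rayA_false_eq_process]
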